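-- pv_equiv track=rewrite | github.com/xinglinzhao/YelpFakeReview | yelp_review_analysis/split_business.py | splitBusinessByCity
-- ===== SOURCE A (Python) =====
-- def splitBusinessByCity(business,cities):
-- 	res = {}
-- 	for c in cities:
-- 		res[c] = []
-- 	res['others'] = []
-- 	for k,v in business.items():
--
-- 		other = True
-- 		for c in cities:
-- 			if c.lower() in v.get('city').lower() :
-- 				res[c].append(v)
-- 				other = False
-- 				break
-- 		if other:
-- 			res['others'].append(v)
-- 	return res
-- ===== SOURCE B (Python) =====
-- def splitBusinessByCity(business, cities):
--     def label(v):
--         return next((c for c in cities if c.lower() in v.get('city').lower()), 'others')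
--     labelled = [(label(v), v) for v in business.values()]
--     res = {c: [v for (l, v) in labelled if l == c] for c in cities}
--     res['others'] = [v for (l, v) in labelled if l == 'others']
--     return res
-- ===== Notes on version B (the rewrite author's own statement) =====
-- stated objective: alternative
-- what changed: A mutates a pre-initialized dict in one pass over the businesses with a break/flag inner loop; B first labels every business with its first matching city (or 'others') and then builds each bucket by a per-key group-by comprehension.
import Mathlib
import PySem

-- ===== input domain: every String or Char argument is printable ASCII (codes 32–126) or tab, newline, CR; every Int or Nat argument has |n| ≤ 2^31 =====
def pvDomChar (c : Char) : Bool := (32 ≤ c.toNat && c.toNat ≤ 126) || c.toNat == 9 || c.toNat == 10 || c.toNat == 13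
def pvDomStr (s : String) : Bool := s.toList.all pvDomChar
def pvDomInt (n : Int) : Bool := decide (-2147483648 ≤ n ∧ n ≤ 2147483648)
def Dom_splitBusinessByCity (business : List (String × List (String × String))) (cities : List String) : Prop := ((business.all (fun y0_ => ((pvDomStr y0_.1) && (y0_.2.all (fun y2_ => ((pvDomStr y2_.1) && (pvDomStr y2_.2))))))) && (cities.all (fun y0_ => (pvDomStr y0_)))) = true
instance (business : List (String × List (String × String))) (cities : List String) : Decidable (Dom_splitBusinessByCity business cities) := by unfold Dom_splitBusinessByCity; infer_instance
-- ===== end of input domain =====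

-- B replaces A's mutate-dict-with-break/flag pass by a label-then-group-by decomposition
-- (one pass computing each business's first matching city, then one bucket comprehension per key);
-- objective: alternative decomposition, same asymptotic cost.

-- ===== PORT A =====
-- shared helper: the Python test  c.lower() in v.get('city').lower()
-- (v.get('city') is None when the key is absent — Python then raises AttributeError; the port
--  reads "" there, and exactly those inputs are excluded by Pre_ below)
def pvMatch (c : String) (v : List (String × String)) : Bool :=
  PySem.Str.isIn (PySem.Str.lower c) (PySem.Str.lower (((PySem.Dict.mk v).get? "city").getD ""))

def splitBusinessByCity (business : List (String × List (String × String))) (cities : List String) : List (String × List (List (String × String))) :=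
  -- res = {}; for c in cities: res[c] = []; res['others'] = []
  let res0 : PySem.Dict String (List (List (String × String))) :=
    (cities.foldl (fun d c => d.insert c []) PySem.Dict.empty).insert "others" []
  -- for k,v in business.items(): inner for/break = first c in cities with a match; append v
  let res := business.foldl (fun res kv =>
    match cities.find? (fun c => pvMatch c kv.2) with
    | some c => res.modify c [] (· ++ [kv.2])       -- res[c].append(v)
    | none   => res.modify "others" [] (· ++ [kv.2])) res0  -- res['others'].append(v)
  res.items

-- ===== PORT B =====
-- label(v) = next((c for c in cities if c.lower() in v.get('city').lower()), 'others')
def pvLabel (cities : List String) (v : List (String × String)) : String :=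
  (cities.find? (fun c => pvMatch c v)).getD "others"

def splitBusinessByCity_alt (business : List (String × List (String × String))) (cities : List String) : List (String × List (List (String × String))) :=
  -- labelled = [(label(v), v) for v in business.values()]
  let labelled := business.map (fun kv => (pvLabel cities kv.2, kv.2))
  -- res = {c: [v for (l, v) in labelled if l == c] for c in cities}
  let res := cities.foldl
    (fun d c => d.insert c ((labelled.filter (fun p => p.1 == c)).map (·.2)))
    PySem.Dict.empty
  -- res['others'] = [v for (l, v) in labelled if l == 'others']
  (res.insert "others" ((labelled.filter (fun p => p.1 == "others")).map (·.2))).items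

-- ===== PRECONDITION & SPEC =====
-- Pre_ excludes exactly the inputs where Python A raises AttributeError: cities is nonempty and
-- some business value has no 'city' key, so v.get('city') is None and None.lower() fails
-- (B fails identically there).
def Pre_splitBusinessByCity (business : List (String × List (String × String))) (cities : List String) : Prop :=
  cities = [] ∨ business.all (fun kv => ((PySem.Dict.mk kv.2).get? "city").isSome) = true
instance (business : List (String × List (String × String))) (cities : List String) : Decidable (Pre_splitBusinessByCity business cities) := by unfold Pre_splitBusinessByCity; infer_instance

def pvWitness_splitBusinessByCity : (List (String × List (String × String))) × List String :=
  ([("b1", [("city", "Ann Arbor")]), ("b2", [("city", "Tucson")])], ["ann", "reno"])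

def Spec_splitBusinessByCity (business : List (String × List (String × String))) (cities : List String) (out : List (String × List (List (String × String)))) : Prop := out = splitBusinessByCity_alt business cities
instance (business : List (String × List (String × String))) (cities : List String) (out : List (String × List (List (String × String)))) : Decidable (Spec_splitBusinessByCity business cities out) := by unfold Spec_splitBusinessByCity; infer_instance

-- ===== CLAIM (what is proved, stated in full; the proofs are below) =====
def Claim_equal_splitBusinessByCity : Prop := ∀ (business : List (String × List (String × String))) (cities : List String), Dom_splitBusinessByCity business cities → Pre_splitBusinessByCity business cities → Spec_splitBusinessByCity business cities (splitBusinessByCity business cities)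

-- ===== LEMMAS AND PROOFS =====

-- the bucket for key k, read off the labelled list
def pvBucket (labelled : List (String × List (String × String))) (k : String) : List (List (String × String)) :=
  (labelled.filter (fun p => p.1 == k)).map (·.2)

-- a foldl of inserts whose value depends only on the key, started from a dict of that same shape,
-- produces items (Set.update S cities).map (fun c => (c, f c))
theorem pv_items_foldl_insert_keyfun {ν : Type} (f : String → ν) (cs : List String)
    (d : PySem.Dict String ν) (S : List String)
    (hd : d.items = S.map (fun c => (c, f c))) :
    (cs.foldl (fun d c => d.insert c (f c)) d).items
      = (PySem.Set.update S cs).map (fun c => (c, f c)) := by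
  induction cs generalizing d S with
  | nil => simpa [PySem.Set.update] using hd
  | cons c cs ih =>
    have hkeys : d.keys = S := by
      simp [PySem.Dict.keys, hd, List.map_map, Function.comp_def]
    by_cases hc : c ∈ S
    · have hcont : d.contains c = true := by
        rw [PySem.Dict.contains_iff_mem_keys, hkeys]; exact hc
      have hadd : PySem.Set.add S c = S := by
        simp [PySem.Set.add, hc]
      have hstep : (d.insert c (f c)).items = S.map (fun x => (x, f x)) := by
        rw [PySem.Dict.items_insert_of_contains d (f c) hcont, hd, List.map_map]
        apply List.map_congr_left
        intro x _
        by_cases hx : x = c <;> simp [Function.comp, hx]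
      simpa [List.foldl_cons, PySem.Set.update, hadd] using
        ih (d.insert c (f c)) S hstep
    · have hcont : d.contains c = false := by
        rw [Bool.eq_false_iff, Ne, PySem.Dict.contains_iff_mem_keys, hkeys]
        exact hc
      have hadd : PySem.Set.add S c = S ++ [c] := by
        simp [PySem.Set.add, hc]
      have hstep : (d.insert c (f c)).items = (S ++ [c]).map (fun x => (x, f x)) := by
        rw [PySem.Dict.items_insert_of_not_contains d (f c) hcont, hd]; simp
      simpa [List.foldl_cons, PySem.Set.update, hadd] using
        ih (d.insert c (f c)) (S ++ [c]) hstep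
  
-- every value of res0 is [], so every getD with default [] is []
theorem pv_getD_const_nil {κ : Type} [BEq κ] [LawfulBEq κ] (d : PySem.Dict κ (List (List (String × String))))
    (h : ∀ p ∈ d.items, p.2 = ([] : List (List (String × String)))) (k : κ) :
    d.getD k [] = [] := by
  rw [PySem.Dict.getD_eq_get?_getD]
  cases hg : d.get? k with
  | none => rfl
  | some v =>
    have := PySem.Dict.mem_items_of_get?_eq_some d hg
    simpa using h _ this

-- A's initial dict, in closed form
theorem pv_res0_items (cities : List String) :
    ((cities.foldl (fun d c => d.insert c ([] : List (List (String × String)))) PySem.Dict.empty).insert "others" []).items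
      = (PySem.Set.add (PySem.Set.ofList cities) "others").map (fun c => (c, [])) := by
  have h1 := pv_items_foldl_insert_keyfun (fun _ => ([] : List (List (String × String)))) cities PySem.Dict.empty [] (by rfl)
  have h2 := pv_items_foldl_insert_keyfun (fun _ => ([] : List (List (String × String)))) ["others"]
    ((cities.foldl (fun d c => d.insert c []) PySem.Dict.empty))
    (PySem.Set.update ([] : List String) cities) h1
  simpa [PySem.Set.update, PySem.Set.ofList_eq_foldl] using h2

-- the keys of A's result are the keys of res0 (all labels are already keys)
theorem pv_update_eq_self (S : PySem.Set String) (xs : List String)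
    (h : ∀ x ∈ xs, x ∈ S) : PySem.Set.update S xs = S := by
  rw [PySem.Set.update_eq_append_filter]
  have hnil : (PySem.Set.ofList xs).filter (fun y => !PySem.Set.contains S y) = [] := by
    rw [List.filter_eq_nil_iff]
    intro a ha
    have haxs : a ∈ xs := (PySem.Set.mem_ofList xs a).mp ha
    simp [h a haxs]
  rw [hnil, List.append_nil]

theorem pv_label_mem (cities : List String) (v : List (String × String)) :
    pvLabel cities v ∈ PySem.Set.add (PySem.Set.ofList cities) "others" := by
  unfold pvLabel
  cases hf : cities.find? (fun c => pvMatch c v) with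
  | none =>
    exact (PySem.Set.mem_add _ _ _).mpr (Or.inr rfl)
  | some c =>
    have hc : c ∈ cities := List.mem_of_find?_eq_some hf
    exact (PySem.Set.mem_add _ _ _).mpr (Or.inl ((PySem.Set.mem_ofList cities c).mpr hc))

-- A's result in closed form
theorem pv_A_eq (business : List (String × List (String × String))) (cities : List String) :
    splitBusinessByCity business cities
      = (PySem.Set.add (PySem.Set.ofList cities) "others").map
          (fun k => (k, pvBucket (business.map (fun kv => (pvLabel cities kv.2, kv.2))) k)) := by
  show (business.foldl (fun res kv =>
      match cities.find? (fun c => pvMatch c kv.2) with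
      | some c => res.modify c [] (· ++ [kv.2])
      | none   => res.modify "others" [] (· ++ [kv.2]))
      ((cities.foldl (fun d c => d.insert c ([] : List (List (String × String)))) PySem.Dict.empty).insert "others" [])).items = _
  set res0 : PySem.Dict String (List (List (String × String))) :=
    (cities.foldl (fun d c => d.insert c []) PySem.Dict.empty).insert "others" [] with hres0
  set labelled := business.map (fun kv => (pvLabel cities kv.2, kv.2)) with hlab
  -- rewrite A's fold as the modify-by-label fold over labelled
  have hfold : (business.foldl (fun res kv =>
      match cities.find? (fun c => pvMatch c kv.2) with
      | some c => res.modify c [] (· ++ [kv.2])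
      | none   => res.modify "others" [] (· ++ [kv.2])) res0)
      = labelled.foldl (fun d p => d.modify p.1 [] (· ++ [p.2])) res0 := by
    rw [hlab, List.foldl_map]
    apply PySem.List.foldl_congr_mem
    intro d kv _
    unfold pvLabel
    cases hf : cities.find? (fun c => pvMatch c kv.2) <;> simp
  rw [hfold]
  set resA := labelled.foldl (fun d p => d.modify p.1 [] (· ++ [p.2])) res0 with hA
  have hkeys0 : res0.keys = PySem.Set.add (PySem.Set.ofList cities) "others" := by
    simp only [PySem.Dict.keys]
    rw [hres0, pv_res0_items cities]
    simp [List.map_map, Function.comp_def]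
  have hkeysA : resA.keys = PySem.Set.add (PySem.Set.ofList cities) "others" := by
    rw [hA, PySem.Dict.keys_foldl_modify_key labelled Prod.fst [] (fun _ p => (· ++ [p.2])) res0, hkeys0]
    apply pv_update_eq_self
    intro x hx
    rw [hlab] at hx
    simp only [List.map_map, List.mem_map] at hx
    obtain ⟨kv, _, hkv⟩ := hx
    rw [← hkv]
    exact pv_label_mem cities kv.2
  have hnodup : resA.keys.Nodup := by
    rw [hA]
    exact PySem.Dict.nodup_keys_foldl_modify_key labelled Prod.fst [] (fun _ p => (· ++ [p.2])) res0
      (by rw [hkeys0]; exact PySem.Set.nodup_add _ _ (PySem.Set.nodup_ofList cities))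
  have hgetD : ∀ k, resA.getD k [] = pvBucket labelled k := by
    intro k
    rw [hA, PySem.Dict.getD_foldl_modify_append labelled res0 k]
    have h0 : res0.getD k [] = [] := by
      apply pv_getD_const_nil
      intro p hp
      rw [pv_res0_items cities] at hp
      simp only [List.mem_map] at hp
      obtain ⟨c, _, hc⟩ := hp
      rw [← hc]
    rw [h0]
    rfl
  rw [PySem.Dict.items_eq_map_keys resA hnodup [], hkeysA]
  apply List.map_congr_left
  intro k _
  rw [hgetD k]

-- B's result in the same closed form
theorem pv_B_eq (business : List (String × List (String × String))) (cities : List String) :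
    splitBusinessByCity_alt business cities
      = (PySem.Set.add (PySem.Set.ofList cities) "others").map
          (fun k => (k, pvBucket (business.map (fun kv => (pvLabel cities kv.2, kv.2))) k)) := by
  show ((cities.foldl
      (fun d c => d.insert c (((business.map (fun kv => (pvLabel cities kv.2, kv.2))).filter (fun p => p.1 == c)).map (·.2)))
      PySem.Dict.empty).insert "others"
      (((business.map (fun kv => (pvLabel cities kv.2, kv.2))).filter (fun p => p.1 == "others")).map (·.2))).items = _
  set labelled := business.map (fun kv => (pvLabel cities kv.2, kv.2)) with hlab
  have h1 := pv_items_foldl_insert_keyfun (fun c => pvBucket labelled c) cities PySem.Dict.empty [] (by rfl)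
  have h2 := pv_items_foldl_insert_keyfun (fun c => pvBucket labelled c) ["others"]
    (cities.foldl (fun d c => d.insert c (pvBucket labelled c)) PySem.Dict.empty)
    (PySem.Set.update ([] : List String) cities) h1
  simpa [PySem.Set.update, PySem.Set.ofList_eq_foldl, pvBucket] using h2

-- ===== VERDICT (by name: the statement is the Claim_ definition above) =====
theorem splitBusinessByCity_spec : Claim_equal_splitBusinessByCity := by
  intro business cities _ _
  unfold Spec_splitBusinessByCity
  rw [pv_A_eq, pv_B_eq]
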